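-- pv_equiv track=rewrite | github.com/laurenhquan/block_blast_buddy | solve.py | find_fragmentation
-- ===== SOURCE A (Python) =====
-- def flood_fill(grid, start, visited):
--     rows = len(grid)
--     cols = len(grid[0]) if rows > 0 else 0
--
--     stack = [start]
--     while stack:
--         r, c = stack.pop()
--         #1=True, 0=False
--         if c < 0 or c >= cols or r < 0 or r >= rows:
--             continue
--         if visited[r][c] or grid[r][c] > 0:
--             continue
--         visited[r][c] = True
--
--         stack.append((r+1, c))
--         stack.append((r-1, c))
--         stack.append((r, c+1))
--         stack.append((r, c-1))
--
-- def find_fragmentation(grid):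
--     rows = len(grid)
--     cols = len(grid[0]) if rows > 0 else 0
--     visited = [[False] * cols for _ in range(rows)]
--     regions = 0
--
--     for r in range(rows):
--         for c in range(cols):
--             if grid[r][c] <= 0 and not visited[r][c]:
--                 flood_fill(grid, (r, c), visited)
--                 regions += 1
--
--     return regions
-- ===== SOURCE B (Python) =====
-- def find_fragmentation(grid):
--     rows = len(grid)
--     cols = len(grid[0]) if rows > 0 else 0
--
--     # count empty cells
--     regions = 0
--     for r in range(rows):
--         for c in range(cols):
--             if grid[r][c] <= 0:
--                 regions += 1
--
--     # disjoint-set forest over flat indices r*cols+c; union by smaller root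
--     parent = list(range(rows * cols))
--
--     def find(x):
--         while parent[x] != x:
--             x = parent[x]
--         return x
--
--     def union(a, b):
--         nonlocal regions
--         ra, rb = find(a), find(b)
--         if ra != rb:
--             parent[max(ra, rb)] = min(ra, rb)
--             regions -= 1
--
--     for r in range(rows):
--         for c in range(cols):
--             if grid[r][c] > 0:
--                 continue
--             i = r * cols + c
--             if c + 1 < cols and grid[r][c + 1] <= 0:
--                 union(i, i + 1)
--             if r + 1 < rows and grid[r + 1][c] <= 0:
--                 union(i, i + cols)
--
--     return regions
-- ===== Notes on version B (the rewrite author's own statement) =====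
-- stated objective: alternative
-- what changed: Replaces the per-region DFS flood fill (explicit stack + visited matrix) by a disjoint-set forest over flat cell indices: count empty cells, union each empty cell with its right and down empty neighbours, and decrement the count on every union that merges two distinct roots.
import Mathlib
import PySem

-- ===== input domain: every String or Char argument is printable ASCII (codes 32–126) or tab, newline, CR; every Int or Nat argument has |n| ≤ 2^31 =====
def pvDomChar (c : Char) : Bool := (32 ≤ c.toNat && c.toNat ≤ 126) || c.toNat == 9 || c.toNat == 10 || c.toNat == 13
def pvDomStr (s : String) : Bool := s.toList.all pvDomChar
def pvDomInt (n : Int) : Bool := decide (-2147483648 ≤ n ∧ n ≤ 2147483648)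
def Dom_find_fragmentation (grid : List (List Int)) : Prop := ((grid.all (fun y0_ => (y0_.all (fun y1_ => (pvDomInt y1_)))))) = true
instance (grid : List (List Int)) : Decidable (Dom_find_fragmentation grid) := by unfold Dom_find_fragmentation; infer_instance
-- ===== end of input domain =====

-- B replaces A's per-region flood fill (explicit DFS stack + visited matrix) by a disjoint-set
-- forest over flat cell indices, counting empty cells and subtracting one per successful union
-- of horizontally/vertically adjacent empty cells (objective: alternative algorithm, similar cost).

-- ===== PORT A =====
def ffCols (grid : List (List Int)) : Nat := if 0 < grid.length then (grid.headD []).length else 0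

def cellGet (grid : List (List Int)) (r c : Int) : Int :=
  PySem.List.pyGetD (PySem.List.pyGetD grid r []) c 0

def vGet (v : List (List Bool)) (r c : Int) : Bool :=
  PySem.List.pyGetD (PySem.List.pyGetD v r []) c false

def vSet (v : List (List Bool)) (r c : Int) : List (List Bool) :=
  PySem.List.pySetD v r (PySem.List.pySetD (PySem.List.pyGetD v r []) c true)

-- the while-loop of flood_fill; fuel is a totalization guard (pops ≤ initial stack + 4·cells)
def floodLoop (grid : List (List Int)) (fuel : Nat) (stack : List (Int × Int))
    (visited : List (List Bool)) : List (List Bool) :=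
  match fuel, stack with
  | 0, _ => visited
  | _, [] => visited
  | fuel+1, (r, c) :: rest =>
    if c < 0 ∨ (ffCols grid : Int) ≤ c ∨ r < 0 ∨ (grid.length : Int) ≤ r then
      floodLoop grid fuel rest visited
    else if vGet visited r c || decide (cellGet grid r c > 0) then
      floodLoop grid fuel rest visited
    else
      floodLoop grid fuel ((r, c-1) :: (r, c+1) :: (r-1, c) :: (r+1, c) :: rest)
        (vSet visited r c)

def flood_fill (grid : List (List Int)) (start : Int × Int)
    (visited : List (List Bool)) : List (List Bool) :=
  floodLoop grid (1 + 4 * (grid.length * ffCols grid)) [start] visited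

def find_fragmentation (grid : List (List Int)) : Int :=
  let rows := grid.length
  let cols := ffCols grid
  let final := (List.range rows).foldl (fun st (r : Nat) =>
    (List.range cols).foldl (fun st (c : Nat) =>
      if decide (cellGet grid (r : Int) (c : Int) ≤ 0) && !(vGet st.1 (r : Int) (c : Int)) then
        (flood_fill grid ((r : Int), (c : Int)) st.1, st.2 + 1)
      else st) st)
    (List.replicate rows (List.replicate cols false), (0 : Int))
  final.2

-- ===== PORT B =====
def altGet (grid : List (List Int)) (r c : Nat) : Int :=
  PySem.List.pyGetD (PySem.List.pyGetD grid (r : Int) []) (c : Int) 0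

-- find(x): follow parent pointers to the root (parents strictly decrease, so fuel x+1 suffices)
def dsuFindGo (parent : List Nat) (fuel x : Nat) : Nat :=
  match fuel with
  | 0 => x
  | fuel+1 => let p := parent.getD x x; if p = x then x else dsuFindGo parent fuel p

def dsuFind (parent : List Nat) (x : Nat) : Nat := dsuFindGo parent (x+1) x

def dsuUnion (st : List Nat × Int) (a b : Nat) : List Nat × Int :=
  let ra := dsuFind st.1 a
  let rb := dsuFind st.1 b
  if ra = rb then st else (st.1.set (max ra rb) (min ra rb), st.2 - 1)

def find_fragmentation_alt (grid : List (List Int)) : Int :=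
  let rows := grid.length
  let cols := if 0 < grid.length then (grid.headD []).length else 0
  let empties : Int := (List.range rows).foldl (fun acc r =>
    (List.range cols).foldl (fun acc c =>
      if altGet grid r c ≤ 0 then acc + 1 else acc) acc) 0
  let final := (List.range rows).foldl (fun st r =>
    (List.range cols).foldl (fun st c =>
      if altGet grid r c > 0 then st
      else
        let i := r * cols + c
        let st1 := if c + 1 < cols ∧ altGet grid r (c+1) ≤ 0 then dsuUnion st i (i+1) else st
        if r + 1 < rows ∧ altGet grid (r+1) c ≤ 0 then dsuUnion st1 i (i + cols) else st1) st)
    (List.range (rows * cols), empties)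
  final.2

-- ===== PRECONDITION & SPEC =====
-- Pre_ excludes exactly the ragged grids on which Python A raises IndexError:
-- some row is shorter than row 0, so grid[r][c] fails for some c < len(grid[0]).
def Pre_find_fragmentation (grid : List (List Int)) : Prop :=
  ∀ row ∈ grid, (grid.headD []).length ≤ row.length
instance (grid : List (List Int)) : Decidable (Pre_find_fragmentation grid) := by
  unfold Pre_find_fragmentation; infer_instance

def pvWitness_find_fragmentation : List (List Int) := [[0, 1], [1, 0]]

def Spec_find_fragmentation (grid : List (List Int)) (out : Int) : Prop := out = find_fragmentation_alt grid
instance (grid : List (List Int)) (out : Int) : Decidable (Spec_find_fragmentation grid out) := by unfold Spec_find_fragmentation; infer_instance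

-- ===== CLAIM (what is proved, stated in full; the proofs are below) =====
def Claim_equal_find_fragmentation : Prop := ∀ (grid : List (List Int)), Dom_find_fragmentation grid → Pre_find_fragmentation grid → Spec_find_fragmentation grid (find_fragmentation grid)

-- ===== LEMMAS AND PROOFS =====


-- ---------- proof-layer definitions ----------

-- flat-index view of the grid: N cells, cell i at row i/C, column i%C, default 0
def gN (g : List (List Int)) : Nat := g.length * ffCols g
def gcell (g : List (List Int)) (i : Nat) : Int := (g.getD (i / ffCols g) []).getD (i % ffCols g) 0
def Em (g : List (List Int)) (i : Nat) : Prop := i < gN g ∧ gcell g i ≤ 0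
-- right/down adjacency between empty cells, and its symmetrisation
def adjE (g : List (List Int)) (i j : Nat) : Prop :=
  Em g i ∧ Em g j ∧ ((j = i + 1 ∧ i % ffCols g + 1 < ffCols g) ∨ j = i + ffCols g)
def stepR (g : List (List Int)) (i j : Nat) : Prop := adjE g i j ∨ adjE g j i
def Reach (g : List (List Int)) : Nat → Nat → Prop := Relation.ReflTransGen (stepR g)
-- reflexive-transitive closure of the symmetrisation of an arbitrary edge relation
def SameRel (R : Nat → Nat → Prop) : Nat → Nat → Prop :=
  Relation.ReflTransGen (fun u v => R u v ∨ R v u)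
-- edges whose source cell is below k (the edges B has processed after k cells)
def RelK (g : List (List Int)) (k : Nat) (u v : Nat) : Prop := adjE g u v ∧ u < k
-- classical filter of [0, n) by a predicate
noncomputable def classFilter (p : Nat → Prop) (n : Nat) : Finset Nat :=
  @Finset.filter _ p (Classical.decPred p) (Finset.range n)
-- representatives: empty cells that are minimal in their connected component
def RepCond (g : List (List Int)) (i : Nat) : Prop := Em g i ∧ ∀ j, Reach g j i → i ≤ j

-- ---------- classFilter lemmas ----------

theorem mem_classFilter {p : Nat → Prop} {n i : Nat} : i ∈ classFilter p n ↔ i < n ∧ p i := by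
  letI := Classical.decPred p
  unfold classFilter
  rw [Finset.filter_congr_decidable, Finset.mem_filter, Finset.mem_range]

theorem classFilter_congr {p q : Nat → Prop} {n : Nat} (h : ∀ i, i < n → (p i ↔ q i)) :
    classFilter p n = classFilter q n := by
  apply Finset.ext
  intro i
  rw [mem_classFilter, mem_classFilter]
  constructor
  · rintro ⟨h1, h2⟩; exact ⟨h1, (h i h1).1 h2⟩
  · rintro ⟨h1, h2⟩; exact ⟨h1, (h i h1).2 h2⟩

theorem card_classFilter_succ_pos {p : Nat → Prop} {n : Nat} (hp : p n) :
    (classFilter p (n+1)).card = (classFilter p n).card + 1 := by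
  have h1 : classFilter p (n+1) = insert n (classFilter p n) := by
    apply Finset.ext
    intro i
    rw [Finset.mem_insert, mem_classFilter, mem_classFilter]
    constructor
    · rintro ⟨h1, h2⟩
      rcases Nat.lt_succ_iff_lt_or_eq.mp h1 with h | h
      · exact Or.inr ⟨h, h2⟩
      · exact Or.inl h
    · rintro (h | ⟨h1, h2⟩)
      · exact ⟨by omega, h ▸ hp⟩
      · exact ⟨by omega, h2⟩
  rw [h1, Finset.card_insert_of_notMem]
  intro hmem
  exact absurd (mem_classFilter.mp hmem).1 (lt_irrefl n)

theorem card_classFilter_succ_neg {p : Nat → Prop} {n : Nat} (hp : ¬ p n) :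
    (classFilter p (n+1)).card = (classFilter p n).card := by
  congr 1
  apply Finset.ext
  intro i
  rw [mem_classFilter, mem_classFilter]
  constructor
  · rintro ⟨h1, h2⟩
    refine ⟨?_, h2⟩
    rcases Nat.lt_succ_iff_lt_or_eq.mp h1 with h | h
    · exact h
    · exact absurd (h ▸ h2) hp
  · rintro ⟨h1, h2⟩; exact ⟨by omega, h2⟩

-- removing one element a (with p a, a < n): q ↔ p ∧ · ≠ a
theorem card_classFilter_erase {p q : Nat → Prop} {n a : Nat} (ha : a < n) (hpa : p a)
    (h : ∀ i, i < n → (q i ↔ p i ∧ i ≠ a)) :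
    (classFilter q n).card + 1 = (classFilter p n).card := by
  have h1 : classFilter q n = (classFilter p n).erase a := by
    apply Finset.ext
    intro i
    rw [Finset.mem_erase, mem_classFilter, mem_classFilter]
    constructor
    · rintro ⟨h1, h2⟩
      have := (h i h1).1 h2
      exact ⟨this.2, h1, this.1⟩
    · rintro ⟨h1, h2, h3⟩
      exact ⟨h2, (h i h2).2 ⟨h3, h1⟩⟩
  have h2 : a ∈ classFilter p n := mem_classFilter.mpr ⟨ha, hpa⟩
  rw [h1, Finset.card_erase_of_mem h2]
  have := Finset.card_pos.mpr ⟨a, h2⟩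
  omega

theorem card_classFilter_le {p : Nat → Prop} {n : Nat} : (classFilter p n).card ≤ n := by
  letI := Classical.decPred p
  unfold classFilter
  rw [Finset.filter_congr_decidable]
  calc (Finset.filter p (Finset.range n)).card ≤ (Finset.range n).card := Finset.card_filter_le _ _
  _ = n := Finset.card_range n

-- ---------- basic facts about Reach / SameRel ----------

theorem stepR_symm {g : List (List Int)} {i j : Nat} (h : stepR g i j) : stepR g j i := h.symm

theorem stepR_em_left {g : List (List Int)} {i j : Nat} (h : stepR g i j) : Em g i := by
  rcases h with ⟨h1, _, _⟩ | ⟨_, h2, _⟩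
  · exact h1
  · exact h2

theorem stepR_em_right {g : List (List Int)} {i j : Nat} (h : stepR g i j) : Em g j :=
  stepR_em_left (stepR_symm h)

theorem reach_symm {g : List (List Int)} {i j : Nat} (h : Reach g i j) : Reach g j i := by
  induction h with
  | refl => exact Relation.ReflTransGen.refl
  | tail _ h2 ih => exact Relation.ReflTransGen.head (stepR_symm h2) ih

theorem reach_em {g : List (List Int)} {i j : Nat} (h : Reach g i j) (hne : i ≠ j) : Em g i := by
  rcases (Relation.ReflTransGen.cases_head h) with h | ⟨c, hc, _⟩
  · exact absurd h hne
  · exact stepR_em_left hc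

theorem reach_closed {g : List (List Int)} {S : Nat → Prop}
    (hS : ∀ i j, S i → stepR g i j → S j) {s t : Nat} (hs : S s) (h : Reach g s t) : S t := by
  induction h with
  | refl => exact hs
  | tail _ h2 ih => exact hS _ _ ih h2

theorem sameRel_congr {R R' : Nat → Nat → Prop} (h : ∀ u v, R u v ↔ R' u v) {x y : Nat}
    (hxy : SameRel R x y) : SameRel R' x y := by
  induction hxy with
  | refl => exact Relation.ReflTransGen.refl
  | tail _ h2 ih =>
      refine Relation.ReflTransGen.tail ih ?_
      rcases h2 with h2 | h2
      · exact Or.inl ((h _ _).1 h2)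
      · exact Or.inr ((h _ _).1 h2)

theorem sameRel_symm {R : Nat → Nat → Prop} {x y : Nat} (h : SameRel R x y) : SameRel R y x := by
  induction h with
  | refl => exact Relation.ReflTransGen.refl
  | tail _ h2 ih => exact Relation.ReflTransGen.head (Or.symm h2) ih

theorem sameRel_zero {g : List (List Int)} {x y : Nat} (h : SameRel (RelK g 0) x y) : x = y := by
  induction h with
  | refl => rfl
  | tail _ h2 ih =>
      rcases h2 with ⟨_, h2⟩ | ⟨_, h2⟩ <;> omega

theorem sameRel_final {g : List (List Int)} {x y : Nat} :
    SameRel (RelK g (gN g)) x y ↔ Reach g x y := by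
  constructor
  · intro h
    induction h with
    | refl => exact Relation.ReflTransGen.refl
    | tail _ h2 ih =>
        refine Relation.ReflTransGen.tail ih ?_
        rcases h2 with ⟨h2, _⟩ | ⟨h2, _⟩
        · exact Or.inl h2
        · exact Or.inr h2
  · intro h
    induction h with
    | refl => exact Relation.ReflTransGen.refl
    | tail _ h2 ih =>
        refine Relation.ReflTransGen.tail ih ?_
        rcases h2 with h2 | h2
        · exact Or.inl ⟨h2, h2.1.1⟩
        · exact Or.inr ⟨h2, h2.1.1⟩

theorem sameRel_em {g : List (List Int)} {R : Nat → Nat → Prop}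
    (hR : ∀ u v, R u v → Em g u ∧ Em g v) {x y : Nat} (h : SameRel R x y) (hx : x ≠ y) :
    Em g y := by
  induction h with
  | refl => exact absurd rfl hx
  | tail _ h2 _ =>
      rcases h2 with h2 | h2
      · exact (hR _ _ h2).2
      · exact (hR _ _ h2).1


-- ---------- index arithmetic ----------

theorem idx_div {C r c : Nat} (hc : c < C) : (r * C + c) / C = r ∧ (r * C + c) % C = c := by
  have h0 : 0 < C := by omega
  constructor
  · rw [mul_comm, Nat.mul_add_div h0, Nat.div_eq_of_lt hc, Nat.add_zero]
  · rw [mul_comm, Nat.mul_add_mod, Nat.mod_eq_of_lt hc]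

theorem idx_lt {R C r c : Nat} (hr : r < R) (hc : c < C) : r * C + c < R * C := by
  have h1 : r * C + c < (r + 1) * C := by
    have : (r + 1) * C = r * C + C := by ring
    omega
  have h2 : (r + 1) * C ≤ R * C := Nat.mul_le_mul_right C (by omega)
  omega

theorem i_decomp {R C i : Nat} (h : i < R * C) :
    i / C < R ∧ i % C < C ∧ (i / C) * C + i % C = i := by
  have h0 : 0 < C := by
    rcases Nat.eq_zero_or_pos C with h1 | h1
    · subst h1; omega
    · exact h1
  have h' : i < C * R := by rwa [mul_comm] at h
  refine ⟨Nat.div_lt_of_lt_mul h', Nat.mod_lt _ h0, ?_⟩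
  have h1 := Nat.div_add_mod i C
  have h2 : (i / C) * C = C * (i / C) := mul_comm _ _
  omega

-- ---------- getD utilities ----------

theorem getD_set_ne {α : Type} {l : List α} {i n : Nat} {a d : α} (h : i ≠ n) :
    (l.set i a).getD n d = l.getD n d := by
  simp [List.getD_eq_getElem?_getD, h]

theorem getD_set_self {α : Type} {l : List α} {i : Nat} {a d : α} (h : i < l.length) :
    (l.set i a).getD i d = a := by
  simp [List.getD_eq_getElem?_getD, h]

theorem getD_replicate' {α : Type} {n m : Nat} {a d : α} :
    (List.replicate n a).getD m d = if m < n then a else d := by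
  by_cases h : m < n
  · simp [List.getD_eq_getElem?_getD, h]
  · simp [List.getD_eq_getElem?_getD, h]

theorem getD_of_length_le {α : Type} {l : List α} {n : Nat} {d : α} (h : l.length ≤ n) :
    l.getD n d = d := by
  simp [List.getD_eq_getElem?_getD, List.getElem?_eq_none_iff.mpr h]

-- ---------- cell / visited bridges ----------

theorem cellGet_natCast (g : List (List Int)) (r c : Nat) :
    cellGet g (r : Int) (c : Int) = (g.getD r []).getD c 0 := by
  simp [cellGet, PySem.List.pyGetD_natCast]

theorem altGet_eq (g : List (List Int)) (r c : Nat) :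
    altGet g r c = (g.getD r []).getD c 0 := by
  simp [altGet, PySem.List.pyGetD_natCast]

theorem gcell_rc {g : List (List Int)} {r c : Nat} (hc : c < ffCols g) :
    gcell g (r * ffCols g + c) = (g.getD r []).getD c 0 := by
  unfold gcell
  rw [(idx_div hc).1, (idx_div hc).2]

-- visited-matrix membership as a predicate on flat indices
def VmI (v : List (List Bool)) (C i : Nat) : Prop := (v.getD (i / C) []).getD (i % C) false = true
def Shape (g : List (List Int)) (v : List (List Bool)) : Prop :=
  v.length = g.length ∧ ∀ row ∈ v, row.length = ffCols g
noncomputable def unvis (g : List (List Int)) (v : List (List Bool)) : Nat :=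
  (classFilter (fun i => ¬ VmI v (ffCols g) i) (gN g)).card

theorem vGet_natCast (v : List (List Bool)) (r c : Nat) :
    vGet v (r : Int) (c : Int) = (v.getD r []).getD c false := by
  simp [vGet, PySem.List.pyGetD_natCast]

theorem vGet_eq_VmI {g : List (List Int)} (v : List (List Bool)) {r c : Nat} (hc : c < ffCols g) :
    (vGet v (r : Int) (c : Int) = true) ↔ VmI v (ffCols g) (r * ffCols g + c) := by
  rw [vGet_natCast]
  unfold VmI
  rw [(idx_div hc).1, (idx_div hc).2]

theorem vSet_spec {g : List (List Int)} {v : List (List Bool)} {r c : Nat} (hs : Shape g v)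
    (hr : r < g.length) (hc : c < ffCols g) :
    Shape g (vSet v (r : Int) (c : Int)) ∧
    (∀ j, VmI (vSet v (r : Int) (c : Int)) (ffCols g) j ↔ j = r * ffCols g + c ∨ VmI v (ffCols g) j) := by
  have hset : vSet v (r : Int) (c : Int) = v.set r ((v.getD r []).set c true) := by
    simp [vSet, PySem.List.pySetD_natCast, PySem.List.pyGetD_natCast]
  rw [hset]
  have hvr : r < v.length := by
    have h1 := hs.1
    omega
  have hrowmem : v.getD r [] ∈ v := by
    rw [List.getD_eq_getElem _ _ hvr]; exact List.getElem_mem hvr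
  have hrowlen : (v.getD r []).length = ffCols g := hs.2 _ hrowmem
  constructor
  · constructor
    · rw [List.length_set]; exact hs.1
    · intro row hrow
      rcases List.mem_or_eq_of_mem_set hrow with h | h
      · exact hs.2 _ h
      · rw [h, List.length_set]; exact hrowlen
  · intro j
    unfold VmI
    by_cases h1 : j / ffCols g = r
    · rw [h1, getD_set_self hvr]
      by_cases h2 : j % ffCols g = c
      · rw [h2, getD_set_self (by rw [hrowlen]; exact hc)]
        have h3 : j = r * ffCols g + c := by
          have h4 := Nat.div_add_mod j (ffCols g)
          have h0 : 0 < ffCols g := by omega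
          have h5 : ffCols g * (j / ffCols g) = ffCols g * r := by rw [h1]
          have h6 : ffCols g * r = r * ffCols g := mul_comm _ _
          omega
        simp [h3]
      · rw [getD_set_ne (fun hx => h2 hx.symm)]
        constructor
        · intro h; exact Or.inr h
        · rintro (h | h)
          · exfalso; apply h2; rw [h]; exact (idx_div hc).2
          · exact h
    · rw [getD_set_ne (fun hx => h1 hx.symm)]
      constructor
      · intro h; exact Or.inr h
      · rintro (h | h)
        · exfalso; apply h1; rw [h]; exact (idx_div hc).1
        · exact h

theorem Shape_init (g : List (List Int)) :
    Shape g (List.replicate g.length (List.replicate (ffCols g) false)) := by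
  constructor
  · exact List.length_replicate
  · intro row hrow
    rw [List.eq_of_mem_replicate hrow]
    exact List.length_replicate

theorem VmI_init (g : List (List Int)) (i : Nat) :
    ¬ VmI (List.replicate g.length (List.replicate (ffCols g) false)) (ffCols g) i := by
  unfold VmI
  rw [getD_replicate']
  by_cases h : i / ffCols g < g.length
  · simp [h]
  · simp [h]

theorem unvis_decr {g : List (List Int)} {v : List (List Bool)} {r c : Nat} (hs : Shape g v)
    (hr : r < g.length) (hc : c < ffCols g) (hnv : ¬ VmI v (ffCols g) (r * ffCols g + c)) :
    unvis g (vSet v (r : Int) (c : Int)) + 1 = unvis g v := by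
  unfold unvis
  apply card_classFilter_erase (p := fun i => ¬ VmI v (ffCols g) i)
  · exact idx_lt hr hc
  · exact hnv
  · intro i _
    rw [(vSet_spec hs hr hc).2 i]
    constructor
    · intro h
      constructor
      · intro hv; exact h (Or.inr hv)
      · intro he; exact h (Or.inl he)
    · rintro ⟨h1, h2⟩ (h | h)
      · exact h2 h
      · exact h1 h

-- ---------- stack entries ----------

def pValid (g : List (List Int)) (p : Int × Int) : Prop :=
  0 ≤ p.1 ∧ p.1 < (g.length : Int) ∧ 0 ≤ p.2 ∧ p.2 < (ffCols g : Int)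
def pIdx (g : List (List Int)) (p : Int × Int) : Nat := p.1.toNat * ffCols g + p.2.toNat

-- the four geometric cases of a step out of i
theorem stepR_cases' {g : List (List Int)} {i j : Nat} (h : stepR g i j) :
    Em g i ∧ Em g j ∧
    ((j = i + 1 ∧ i % ffCols g + 1 < ffCols g) ∨ j = i + ffCols g ∨
     (i = j + 1 ∧ j % ffCols g + 1 < ffCols g) ∨ i = j + ffCols g) := by
  rcases h with ⟨h1, h2, h3⟩ | ⟨h1, h2, h3⟩
  · exact ⟨h1, h2, by tauto⟩
  · exact ⟨h2, h1, by tauto⟩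

theorem stepR_mk_right {g : List (List Int)} {i : Nat} (hi : Em g i) (hj : Em g (i+1))
    (hc : i % ffCols g + 1 < ffCols g) : stepR g i (i+1) := Or.inl ⟨hi, hj, Or.inl ⟨rfl, hc⟩⟩
theorem stepR_mk_down {g : List (List Int)} {i : Nat} (hi : Em g i) (hj : Em g (i + ffCols g)) :
    stepR g i (i + ffCols g) := Or.inl ⟨hi, hj, Or.inr rfl⟩

-- ---------- the flood-fill loop ----------

theorem floodLoop_spec (g : List (List Int)) :
    ∀ (fuel : Nat) (stack : List (Int × Int)) (v : List (List Bool)),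
    Shape g v →
    (∀ i, VmI v (ffCols g) i → Em g i) →
    stack.length + 4 * unvis g v ≤ fuel →
    (∀ a j, VmI v (ffCols g) a → stepR g a j →
        VmI v (ffCols g) j ∨ ∃ p ∈ stack, pValid g p ∧ pIdx g p = j) →
    (Shape g (floodLoop g fuel stack v) ∧
     (∀ i, VmI v (ffCols g) i → VmI (floodLoop g fuel stack v) (ffCols g) i) ∧
     (∀ i, VmI (floodLoop g fuel stack v) (ffCols g) i → Em g i) ∧
     (∀ i, VmI (floodLoop g fuel stack v) (ffCols g) i →
        VmI v (ffCols g) i ∨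
          ∃ p ∈ stack, pValid g p ∧ Em g (pIdx g p) ∧ Reach g (pIdx g p) i) ∧
     (∀ p ∈ stack, pValid g p → Em g (pIdx g p) →
        VmI (floodLoop g fuel stack v) (ffCols g) (pIdx g p)) ∧
     (∀ a j, VmI (floodLoop g fuel stack v) (ffCols g) a → stepR g a j →
        VmI (floodLoop g fuel stack v) (ffCols g) j)) := by
  intro fuel
  induction fuel with
  | zero =>
      intro stack v hs hE hf hcl
      have hstack : stack = [] := by
        cases stack with
        | nil => rfl
        | cons a t => simp at hf
      subst hstack
      have hw : floodLoop g 0 [] v = v := rfl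
      rw [hw]
      refine ⟨hs, fun i h => h, hE, fun i h => Or.inl h, ?_, ?_⟩
      · intro p hp; simp at hp
      · intro a j ha hstep
        rcases hcl a j ha hstep with h | ⟨p, hp, _⟩
        · exact h
        · simp at hp
  | succ f ih =>
      intro stack v hs hE hf hcl
      cases stack with
      | nil =>
          have hw : floodLoop g (f+1) [] v = v := rfl
          rw [hw]
          refine ⟨hs, fun i h => h, hE, fun i h => Or.inl h, ?_, ?_⟩
          · intro p hp; simp at hp
          · intro a j ha hstep
            rcases hcl a j ha hstep with h | ⟨p, hp, _⟩
            · exact h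
            · simp at hp
      | cons hd rest =>
          obtain ⟨r, c⟩ := hd
          have hw : floodLoop g (f+1) ((r, c) :: rest) v =
              (if c < 0 ∨ (ffCols g : Int) ≤ c ∨ r < 0 ∨ (g.length : Int) ≤ r then
                floodLoop g f rest v
              else if vGet v r c || decide (cellGet g r c > 0) then
                floodLoop g f rest v
              else
                floodLoop g f ((r, c-1) :: (r, c+1) :: (r-1, c) :: (r+1, c) :: rest)
                  (vSet v r c)) := rfl
          rw [hw]
          by_cases hA : c < 0 ∨ (ffCols g : Int) ≤ c ∨ r < 0 ∨ (g.length : Int) ≤ r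
          · -- out of bounds: skip
            rw [if_pos hA]
            have hcl' : ∀ a j, VmI v (ffCols g) a → stepR g a j →
                VmI v (ffCols g) j ∨ ∃ p ∈ rest, pValid g p ∧ pIdx g p = j := by
              intro a j ha hstep
              rcases hcl a j ha hstep with h | ⟨p, hp, hval, hidx⟩
              · exact Or.inl h
              · rcases List.mem_cons.mp hp with h | h
                · exfalso
                  subst h
                  rcases hval with ⟨h1, h2, h3, h4⟩
                  simp only at h1 h2 h3 h4
                  omega
                · exact Or.inr ⟨p, h, hval, hidx⟩
            obtain ⟨c1, c2, c3, c4, c5, c6⟩ :=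
              ih rest v hs hE (by simp at hf ⊢; omega) hcl'
            refine ⟨c1, c2, c3, ?_, ?_, c6⟩
            · intro i hi
              rcases c4 i hi with h | ⟨p, hp, h2, h3, h4⟩
              · exact Or.inl h
              · exact Or.inr ⟨p, List.mem_cons_of_mem _ hp, h2, h3, h4⟩
            · intro p hp hval hEm
              rcases List.mem_cons.mp hp with h | h
              · exfalso
                subst h
                rcases hval with ⟨h1, h2, h3, h4⟩
                simp only at h1 h2 h3 h4
                omega
              · exact c5 p h hval hEm
          · -- in bounds
            rw [if_neg hA]
            push_neg at hA
            obtain ⟨hc0, hcC, hr0, hrR⟩ := hA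
            obtain ⟨rn, rfl⟩ : ∃ n : Nat, r = (n : Int) :=
              ⟨r.toNat, (Int.toNat_of_nonneg hr0).symm⟩
            obtain ⟨cn, rfl⟩ : ∃ n : Nat, c = (n : Int) :=
              ⟨c.toNat, (Int.toNat_of_nonneg hc0).symm⟩
            have hrn : rn < g.length := by exact_mod_cast hrR
            have hcn : cn < ffCols g := by exact_mod_cast hcC
            have hidx0 : pIdx g ((rn : Int), (cn : Int)) = rn * ffCols g + cn := by
              simp [pIdx]
            have hval0 : pValid g ((rn : Int), (cn : Int)) := by
              refine ⟨by omega, by omega, by omega, by omega⟩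
            have hi0N : rn * ffCols g + cn < gN g := idx_lt hrn hcn
            have hcell : cellGet g (rn : Int) (cn : Int) = gcell g (rn * ffCols g + cn) := by
              rw [cellGet_natCast, gcell_rc hcn]
            by_cases hB : (vGet v (rn : Int) (cn : Int) || decide (cellGet g (rn : Int) (cn : Int) > 0)) = true
            · -- visited or wall: skip
              rw [if_pos hB]
              have hBor : VmI v (ffCols g) (rn * ffCols g + cn) ∨
                  gcell g (rn * ffCols g + cn) > 0 := by
                rcases Bool.or_eq_true_iff.mp hB with h | h
                · exact Or.inl ((vGet_eq_VmI v hcn).mp h)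
                · right; rw [← hcell]; exact of_decide_eq_true h
              have hcl' : ∀ a j, VmI v (ffCols g) a → stepR g a j →
                  VmI v (ffCols g) j ∨ ∃ p ∈ rest, pValid g p ∧ pIdx g p = j := by
                intro a j ha hstep
                rcases hcl a j ha hstep with h | ⟨p, hp, hval, hidxp⟩
                · exact Or.inl h
                · rcases List.mem_cons.mp hp with h | h
                  · subst h
                    rw [hidx0] at hidxp
                    subst hidxp
                    rcases hBor with h | h
                    · exact Or.inl h
                    · exfalso
                      have := (stepR_em_right hstep).2
                      omega
                  · exact Or.inr ⟨p, h, hval, hidxp⟩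
              obtain ⟨c1, c2, c3, c4, c5, c6⟩ :=
                ih rest v hs hE (by simp at hf ⊢; omega) hcl'
              refine ⟨c1, c2, c3, ?_, ?_, c6⟩
              · intro i hi
                rcases c4 i hi with h | ⟨p, hp, h2, h3, h4⟩
                · exact Or.inl h
                · exact Or.inr ⟨p, List.mem_cons_of_mem _ hp, h2, h3, h4⟩
              · intro p hp hval hEm
                rcases List.mem_cons.mp hp with h | h
                · subst h
                  rw [hidx0] at hEm ⊢
                  rcases hBor with h | h
                  · exact c2 _ h
                  · exfalso; have := hEm.2; omega
                · exact c5 p h hval hEm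
            · -- mark and push neighbours
              rw [if_neg hB]
              rw [Bool.or_eq_true_iff] at hB
              push_neg at hB
              obtain ⟨hnv', hnw'⟩ := hB
              have hnv : ¬ VmI v (ffCols g) (rn * ffCols g + cn) := by
                intro h
                exact hnv' ((vGet_eq_VmI v hcn).mpr h)
              have hnw : gcell g (rn * ffCols g + cn) ≤ 0 := by
                have h := hnw'
                rw [hcell] at h
                simpa using h
              have hEm0 : Em g (rn * ffCols g + cn) := ⟨hi0N, hnw⟩
              obtain ⟨hs', hv'⟩ := vSet_spec hs hrn hcn
              set i0 := rn * ffCols g + cn with hi0def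
              set v' := vSet v (rn : Int) (cn : Int) with hv'def
              have hmod0 : i0 % ffCols g = cn := by rw [hi0def]; exact (idx_div hcn).2
              have hmul1 : (rn + 1) * ffCols g = rn * ffCols g + ffCols g := by ring
              have hE' : ∀ i, VmI v' (ffCols g) i → Em g i := by
                intro i hi
                rcases (hv' i).mp hi with h | h
                · exact h ▸ hEm0
                · exact hE i h
              have hfuel' : (((rn : Int), (cn : Int) - 1) :: ((rn : Int), (cn : Int) + 1) ::
                  ((rn : Int) - 1, (cn : Int)) :: ((rn : Int) + 1, (cn : Int)) :: rest).length
                    + 4 * unvis g v' ≤ f := by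
                have hd : unvis g v' + 1 = unvis g v := by
                  rw [hv'def]; exact unvis_decr hs hrn hcn hnv
                simp only [List.length_cons] at hf ⊢
                omega
              -- the four pushed pairs realize all steps out of i0
              have hnbr : ∀ j, stepR g i0 j →
                  ∃ p ∈ (((rn : Int), (cn : Int) - 1) :: ((rn : Int), (cn : Int) + 1) ::
                    ((rn : Int) - 1, (cn : Int)) :: ((rn : Int) + 1, (cn : Int)) :: rest),
                    pValid g p ∧ pIdx g p = j := by
                intro j hstep
                obtain ⟨_, hEmj, hgeo⟩ := stepR_cases' hstep
                have hjN : j < gN g := hEmj.1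
                have hCpos : 0 < ffCols g := by omega
                rcases hgeo with ⟨hj, hcc⟩ | hj | ⟨hj, hcc⟩ | hj
                · -- right neighbour (r, c+1)
                  have hlt : cn + 1 < ffCols g := by omega
                  refine ⟨((rn : Int), (cn : Int) + 1), by simp, ⟨by omega, by omega, by omega, by omega⟩, ?_⟩
                  have ht : ((cn : Int) + 1).toNat = cn + 1 := by omega
                  simp only [pIdx, ht, Int.toNat_natCast]
                  omega
                · -- down neighbour (r+1, c)
                  have hrn1 : rn + 1 < g.length := by
                    by_contra hcon
                    have h1 : g.length * ffCols g ≤ (rn + 1) * ffCols g :=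
                      Nat.mul_le_mul_right _ (by omega)
                    unfold gN at hjN
                    omega
                  refine ⟨((rn : Int) + 1, (cn : Int)), by simp, ⟨by omega, by omega, by omega, by omega⟩, ?_⟩
                  have ht : ((rn : Int) + 1).toNat = rn + 1 := by omega
                  simp only [pIdx, ht, Int.toNat_natCast]
                  omega
                · -- left neighbour (r, c-1)
                  have hcpos : 0 < cn := by
                    by_contra hcon
                    have hcn0 : cn = 0 := by omega
                    subst hcn0
                    rcases Nat.eq_zero_or_pos rn with hr0' | hr0'
                    · subst hr0'
                      simp at hi0def
                      omega
                    · have hj' : j = (rn - 1) * ffCols g + (ffCols g - 1) := by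
                        have h2 : (rn - 1 + 1) * ffCols g = (rn - 1) * ffCols g + ffCols g := by ring
                        have h3 : rn - 1 + 1 = rn := by omega
                        rw [h3] at h2
                        omega
                      have h4 := (@idx_div (ffCols g) (rn - 1) (ffCols g - 1) (by omega)).2
                      rw [hj'] at hcc
                      rw [h4] at hcc
                      omega
                  refine ⟨((rn : Int), (cn : Int) - 1), by simp, ⟨by omega, by omega, by omega, by omega⟩, ?_⟩
                  have ht : ((cn : Int) - 1).toNat = cn - 1 := by omega
                  simp only [pIdx, ht, Int.toNat_natCast]
                  omega
                · -- up neighbour (r-1, c)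
                  have hrpos : 0 < rn := by
                    by_contra hcon
                    have hrn0 : rn = 0 := by omega
                    subst hrn0
                    simp at hi0def
                    omega
                  have hmul2 : (rn - 1 + 1) * ffCols g = (rn - 1) * ffCols g + ffCols g := by ring
                  have hmul3 : rn - 1 + 1 = rn := by omega
                  rw [hmul3] at hmul2
                  refine ⟨((rn : Int) - 1, (cn : Int)), by simp, ⟨by omega, by omega, by omega, by omega⟩, ?_⟩
                  have ht : ((rn : Int) - 1).toNat = rn - 1 := by omega
                  simp only [pIdx, ht, Int.toNat_natCast]
                  omega
              -- conversely, each valid empty pushed pair is one step from i0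
              have hnbr2 : ∀ p ∈ [((rn : Int), (cn : Int) - 1), ((rn : Int), (cn : Int) + 1),
                    ((rn : Int) - 1, (cn : Int)), ((rn : Int) + 1, (cn : Int))],
                  pValid g p → Em g (pIdx g p) → stepR g i0 (pIdx g p) := by
                intro p hp hval hEmp
                simp only [List.mem_cons, List.not_mem_nil, or_false] at hp
                rcases hp with rfl | rfl | rfl | rfl
                · -- (r, c-1)
                  obtain ⟨_, _, h3, h4⟩ := hval
                  simp only at h3 h4
                  have hcpos : 0 < cn := by omega
                  have ht : ((cn : Int) - 1).toNat = cn - 1 := by omega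
                  have hidxp : pIdx g ((rn : Int), (cn : Int) - 1) = rn * ffCols g + (cn - 1) := by
                    simp only [pIdx, ht, Int.toNat_natCast]
                  rw [hidxp] at hEmp ⊢
                  have h5 : rn * ffCols g + (cn - 1) + 1 = i0 := by omega
                  have h6 : (rn * ffCols g + (cn - 1)) % ffCols g + 1 < ffCols g := by
                    rw [(idx_div (show cn - 1 < ffCols g by omega)).2]
                    omega
                  have hstep := stepR_mk_right hEmp (h5 ▸ hEm0) h6
                  rw [h5] at hstep
                  exact stepR_symm hstep
                · -- (r, c+1)
                  obtain ⟨_, _, _, h4⟩ := hval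
                  simp only at h4
                  have ht : ((cn : Int) + 1).toNat = cn + 1 := by omega
                  have hidxp : pIdx g ((rn : Int), (cn : Int) + 1) = i0 + 1 := by
                    simp only [pIdx, ht, Int.toNat_natCast]
                    omega
                  rw [hidxp] at hEmp ⊢
                  have h6 : i0 % ffCols g + 1 < ffCols g := by omega
                  exact stepR_mk_right hEm0 hEmp h6
                · -- (r-1, c)
                  obtain ⟨h1, _, _, _⟩ := hval
                  simp only at h1
                  have hrpos : 0 < rn := by omega
                  have ht : ((rn : Int) - 1).toNat = rn - 1 := by omega
                  have hmul2 : (rn - 1 + 1) * ffCols g = (rn - 1) * ffCols g + ffCols g := by ring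
                  have hmul3 : rn - 1 + 1 = rn := by omega
                  rw [hmul3] at hmul2
                  have hidxp : pIdx g ((rn : Int) - 1, (cn : Int)) = (rn - 1) * ffCols g + cn := by
                    simp only [pIdx, ht, Int.toNat_natCast]
                  rw [hidxp] at hEmp ⊢
                  have h5 : (rn - 1) * ffCols g + cn + ffCols g = i0 := by omega
                  have hstep := stepR_mk_down hEmp (h5 ▸ hEm0)
                  rw [h5] at hstep
                  exact stepR_symm hstep
                · -- (r+1, c)
                  have ht : ((rn : Int) + 1).toNat = rn + 1 := by omega
                  have hidxp : pIdx g ((rn : Int) + 1, (cn : Int)) = i0 + ffCols g := by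
                    simp only [pIdx, ht, Int.toNat_natCast]
                    omega
                  rw [hidxp] at hEmp ⊢
                  exact stepR_mk_down hEm0 hEmp
              have hcl' : ∀ a j, VmI v' (ffCols g) a → stepR g a j →
                  VmI v' (ffCols g) j ∨ ∃ p ∈ (((rn : Int), (cn : Int) - 1) ::
                    ((rn : Int), (cn : Int) + 1) :: ((rn : Int) - 1, (cn : Int)) ::
                    ((rn : Int) + 1, (cn : Int)) :: rest), pValid g p ∧ pIdx g p = j := by
                intro a j ha hstep
                rcases (hv' a).mp ha with h | h
                · subst h
                  exact Or.inr (hnbr j hstep)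
                · rcases hcl a j h hstep with h2 | ⟨p, hp, hval, hidxp⟩
                  · exact Or.inl ((hv' j).mpr (Or.inr h2))
                  · rcases List.mem_cons.mp hp with h3 | h3
                    · subst h3
                      rw [hidx0] at hidxp
                      exact Or.inl ((hv' j).mpr (Or.inl hidxp.symm))
                    · exact Or.inr ⟨p, by simp [List.mem_cons, h3], hval, hidxp⟩
              obtain ⟨c1, c2, c3, c4, c5, c6⟩ := ih _ v' hs' hE' hfuel' hcl'
              have hvm0 : VmI v' (ffCols g) i0 := (hv' i0).mpr (Or.inl rfl)
              refine ⟨c1, ?_, c3, ?_, ?_, c6⟩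
              · intro i hi
                exact c2 i ((hv' i).mpr (Or.inr hi))
              · intro i hi
                rcases c4 i hi with h | ⟨p, hp, hval, hEmp, hreach⟩
                · rcases (hv' i).mp h with h2 | h2
                  · subst h2
                    exact Or.inr ⟨((rn : Int), (cn : Int)), List.mem_cons_self, hval0,
                      by rw [hidx0]; exact hEm0,
                      by rw [hidx0]; exact Relation.ReflTransGen.refl⟩
                  · exact Or.inl h2
                · by_cases hrest : p ∈ rest
                  · exact Or.inr ⟨p, List.mem_cons_of_mem _ hrest, hval, hEmp, hreach⟩
                  · have hp4 : p ∈ [((rn : Int), (cn : Int) - 1), ((rn : Int), (cn : Int) + 1),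
                        ((rn : Int) - 1, (cn : Int)), ((rn : Int) + 1, (cn : Int))] := by
                      simp only [List.mem_cons, List.not_mem_nil, or_false] at hp ⊢
                      tauto
                    have hstep := hnbr2 p hp4 hval hEmp
                    refine Or.inr ⟨((rn : Int), (cn : Int)), List.mem_cons_self, hval0,
                      by rw [hidx0]; exact hEm0, ?_⟩
                    rw [hidx0]
                    exact Relation.ReflTransGen.head hstep hreach
              · intro p hp hval hEmp
                rcases List.mem_cons.mp hp with h | h
                · subst h
                  rw [hidx0] at hEmp ⊢
                  exact c2 _ hvm0
                · exact c5 p (by simp [List.mem_cons, h]) hval hEmp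


-- ---------- flood_fill: marks exactly the component of the start ----------

theorem flood_fill_spec (g : List (List Int)) (v : List (List Bool)) (s : Int × Int)
    (hs : Shape g v) (hE : ∀ i, VmI v (ffCols g) i → Em g i)
    (hcl : ∀ a j, VmI v (ffCols g) a → stepR g a j → VmI v (ffCols g) j)
    (hval : pValid g s) (hEm : Em g (pIdx g s)) :
    Shape g (flood_fill g s v) ∧
    (∀ i, VmI (flood_fill g s v) (ffCols g) i ↔
        (VmI v (ffCols g) i ∨ Reach g (pIdx g s) i)) ∧
    (∀ i, VmI (flood_fill g s v) (ffCols g) i → Em g i) ∧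
    (∀ a j, VmI (flood_fill g s v) (ffCols g) a → stepR g a j →
        VmI (flood_fill g s v) (ffCols g) j) := by
  have hfuel : [s].length + 4 * unvis g v ≤ 1 + 4 * (g.length * ffCols g) := by
    have h1 : unvis g v ≤ gN g := card_classFilter_le
    unfold gN at h1
    simp only [List.length_singleton]
    omega
  have hcl' : ∀ a j, VmI v (ffCols g) a → stepR g a j →
      VmI v (ffCols g) j ∨ ∃ p ∈ [s], pValid g p ∧ pIdx g p = j := by
    intro a j ha hstep
    exact Or.inl (hcl a j ha hstep)
  obtain ⟨c1, c2, c3, c4, c5, c6⟩ :=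
    floodLoop_spec g (1 + 4 * (g.length * ffCols g)) [s] v hs hE hfuel hcl'
  refine ⟨c1, ?_, c3, c6⟩
  intro i
  constructor
  · intro hi
    rcases c4 i hi with h | ⟨p, hp, _, _, hreach⟩
    · exact Or.inl h
    · simp only [List.mem_singleton] at hp
      subst hp
      exact Or.inr hreach
  · rintro (h | h)
    · exact c2 i h
    · have hst : VmI (flood_fill g s v) (ffCols g) (pIdx g s) :=
        c5 s (List.mem_singleton_self s) hval hEm
      exact reach_closed c6 hst h

-- ---------- generic fold plumbing ----------

theorem foldl_congr' {α β : Type} (l : List β) (f f' : α → β → α) (init : α)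
    (h : ∀ a x, x ∈ l → f a x = f' a x) : l.foldl f init = l.foldl f' init := by
  induction l generalizing init with
  | nil => rfl
  | cons x t ih =>
      simp only [List.foldl_cons]
      rw [h init x (List.mem_cons_self), ih _ (fun a y hy => h a y (List.mem_cons_of_mem _ hy))]

-- a row-by-row double loop is the flat loop over all cells
theorem nested_foldl {α : Type} (f : α → Nat → Nat → α) (rows cols : Nat) (init : α) :
    (List.range rows).foldl (fun st r => (List.range cols).foldl (fun st c => f st r c) st) init
    = (List.range (rows * cols)).foldl (fun st i => f st (i / cols) (i % cols)) init := by
  rcases Nat.eq_zero_or_pos cols with hc | hc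
  · subst hc
    simp only [Nat.mul_zero, List.range_zero, List.foldl_nil]
    induction rows with
    | zero => simp
    | succ n ih => rw [List.range_succ, List.foldl_append, ih]; simp
  · induction rows with
    | zero => simp
    | succ n ih =>
        rw [List.range_succ, List.foldl_append, ih]
        have h1 : (n + 1) * cols = n * cols + cols := by ring
        rw [h1, List.range_add, List.foldl_append, List.foldl_map]
        simp only [List.foldl_cons, List.foldl_nil]
        apply foldl_congr'
        intro a c hcmem
        have hclt : c < cols := List.mem_range.mp hcmem
        rw [(idx_div hclt).1, (idx_div hclt).2]

-- invariant propagation along a fold over List.range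
theorem foldl_range_invariant {α : Type} (P : Nat → α → Prop) (f : α → Nat → α) (n : Nat)
    (init : α) (h0 : P 0 init) (hstep : ∀ k st, k < n → P k st → P (k+1) (f st k)) :
    P n ((List.range n).foldl f init) := by
  have h : ∀ m, m ≤ n → P m ((List.range m).foldl f init) := by
    intro m
    induction m with
    | zero => intro _; simpa using h0
    | succ k ih =>
        intro hm
        rw [List.range_succ, List.foldl_append]
        simp only [List.foldl_cons, List.foldl_nil]
        exact hstep k _ (by omega) (ih (by omega))
  exact h n (le_refl n)

-- ---------- A-side loop invariant ----------

-- cells already absorbed after processing the first k cells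
def VkP (g : List (List Int)) (k t : Nat) : Prop := ∃ s, s < k ∧ Em g s ∧ Reach g s t
noncomputable def repCount (g : List (List Int)) (k : Nat) : Nat :=
  (classFilter (RepCond g) k).card

theorem VkP_em {g : List (List Int)} {k t : Nat} (h : VkP g k t) : Em g t := by
  obtain ⟨s, _, hEm, hr⟩ := h
  exact reach_closed (fun a b _ hb => stepR_em_right hb) hEm hr

theorem VkP_closed {g : List (List Int)} {k : Nat} :
    ∀ a j, VkP g k a → stepR g a j → VkP g k j := by
  rintro a j ⟨s, h1, h2, h3⟩ hstep
  exact ⟨s, h1, h2, Relation.ReflTransGen.tail h3 hstep⟩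

theorem VkP_succ {g : List (List Int)} {k i : Nat} :
    VkP g (k+1) i ↔ VkP g k i ∨ (Em g k ∧ Reach g k i) := by
  constructor
  · rintro ⟨s, h1, h2, h3⟩
    rcases Nat.lt_succ_iff_lt_or_eq.mp h1 with h | h
    · exact Or.inl ⟨s, h, h2, h3⟩
    · subst h; exact Or.inr ⟨h2, h3⟩
  · rintro (⟨s, h1, h2, h3⟩ | ⟨h1, h2⟩)
    · exact ⟨s, by omega, h2, h3⟩
    · exact ⟨k, by omega, h1, h2⟩

def bodyA (g : List (List Int)) (st : List (List Bool) × Int) (r c : Nat) :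
    List (List Bool) × Int :=
  if decide (cellGet g (r : Int) (c : Int) ≤ 0) && !(vGet st.1 (r : Int) (c : Int)) then
    (flood_fill g ((r : Int), (c : Int)) st.1, st.2 + 1)
  else st

def invA (g : List (List Int)) (k : Nat) (st : List (List Bool) × Int) : Prop :=
  Shape g st.1 ∧ (∀ i, VmI st.1 (ffCols g) i ↔ VkP g k i) ∧ st.2 = (repCount g k : Int)

theorem A_loop (g : List (List Int)) :
    invA g (gN g) ((List.range (gN g)).foldl
      (fun st i => bodyA g st (i / ffCols g) (i % ffCols g))
      (List.replicate g.length (List.replicate (ffCols g) false), (0 : Int))) := by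
  apply foldl_range_invariant
  · refine ⟨Shape_init g, ?_, ?_⟩
    · intro i
      simp only []
      constructor
      · intro h; exact absurd h (VmI_init g i)
      · rintro ⟨s, h, _⟩; omega
    · simp [repCount, classFilter]
  · intro k st hk hP
    obtain ⟨hs, hv, hreg⟩ := hP
    obtain ⟨hrlt, hclt, hrc⟩ := i_decomp (show k < g.length * ffCols g from hk)
    set r := k / ffCols g with hrdef
    set c := k % ffCols g with hcdef
    have hE : ∀ i, VmI st.1 (ffCols g) i → Em g i := by
      intro i hi; exact VkP_em ((hv i).mp hi)
    have hcell : cellGet g (r : Int) (c : Int) = gcell g k := by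
      rw [cellGet_natCast, ← gcell_rc hclt, hrc]
    have hvget : (vGet st.1 (r : Int) (c : Int) = true) ↔ VmI st.1 (ffCols g) k := by
      rw [vGet_eq_VmI st.1 hclt, hrc]
    unfold bodyA
    by_cases hcond : (decide (cellGet g (r : Int) (c : Int) ≤ 0)
        && !(vGet st.1 (r : Int) (c : Int))) = true
    · rw [if_pos hcond]
      rw [Bool.and_eq_true, Bool.not_eq_eq_eq_not, Bool.not_true] at hcond
      obtain ⟨h1, h2⟩ := hcond
      have hcle : gcell g k ≤ 0 := by rw [← hcell]; exact of_decide_eq_true h1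
      have hnv : ¬ VmI st.1 (ffCols g) k := by
        intro h; rw [hvget.mpr h] at h2; simp at h2
      have hEmk : Em g k := ⟨hk, hcle⟩
      have hval : pValid g ((r : Int), (c : Int)) := by
        refine ⟨?_, ?_, ?_, ?_⟩
        · exact Int.natCast_nonneg _
        · show (r : Int) < (g.length : Int)
          exact_mod_cast hrlt
        · exact Int.natCast_nonneg _
        · show (c : Int) < (ffCols g : Int)
          exact_mod_cast hclt
      have hidx : pIdx g ((r : Int), (c : Int)) = k := by
        simp only [pIdx, Int.toNat_natCast]; exact hrc
      obtain ⟨f1, f2, f3, f4⟩ := flood_fill_spec g st.1 ((r : Int), (c : Int)) hs hE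
        (fun a j ha hstep => (hv j).mpr (VkP_closed a j ((hv a).mp ha) hstep))
        hval (hidx ▸ hEmk)
      refine ⟨f1, ?_, ?_⟩
      · intro i
        rw [f2 i, hv i, hidx, VkP_succ]
        constructor
        · rintro (h | h)
          · exact Or.inl h
          · exact Or.inr ⟨hEmk, h⟩
        · rintro (h | ⟨_, h⟩)
          · exact Or.inl h
          · exact Or.inr h
      · have hrep : RepCond g k := by
          refine ⟨hEmk, ?_⟩
          intro j hj
          by_contra hcon
          have hjk : j < k := by omega
          have hEmj : Em g j := reach_em hj (by omega)
          exact hnv ((hv k).mpr ⟨j, hjk, hEmj, hj⟩)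
        simp only []
        rw [hreg]
        unfold repCount
        rw [card_classFilter_succ_pos hrep]
        push_cast
        ring
    · rw [if_neg hcond]
      rw [Bool.and_eq_true, Bool.not_eq_eq_eq_not, Bool.not_true] at hcond
      push_neg at hcond
      have hcase : ¬ (gcell g k ≤ 0) ∨ VmI st.1 (ffCols g) k := by
        by_cases hgl : gcell g k ≤ 0
        · right
          have := hcond (by rw [hcell]; exact decide_eq_true hgl)
          rw [← hvget]
          simpa using this
        · exact Or.inl hgl
      have hVk : ∀ i, VkP g (k+1) i ↔ VkP g k i := by
        intro i
        rw [VkP_succ]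
        constructor
        · rintro (h | ⟨hEmk, hre⟩)
          · exact h
          · rcases hcase with h2 | h2
            · exact absurd hEmk.2 h2
            · obtain ⟨s, hs1, hs2, hs3⟩ := (hv k).mp h2
              exact ⟨s, hs1, hs2, Relation.ReflTransGen.trans hs3 hre⟩
        · exact Or.inl
      have hnrep : ¬ RepCond g k := by
        rintro ⟨hEmk, hmin⟩
        rcases hcase with h2 | h2
        · exact h2 hEmk.2
        · obtain ⟨s, hs1, hs2, hs3⟩ := (hv k).mp h2
          have := hmin s hs3
          omega
      refine ⟨hs, ?_, ?_⟩
      · intro i; rw [hv i, hVk i]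
      · rw [hreg]
        unfold repCount
        rw [card_classFilter_succ_neg hnrep]

-- the A port computes the number of component representatives
theorem A_char (g : List (List Int)) :
    find_fragmentation g = (repCount g (gN g) : Int) := by
  have h1 : find_fragmentation g = ((List.range g.length).foldl (fun st r =>
      (List.range (ffCols g)).foldl (fun st c => bodyA g st r c) st)
      (List.replicate g.length (List.replicate (ffCols g) false), (0 : Int))).2 := by
    unfold find_fragmentation bodyA
    rfl
  rw [h1, nested_foldl (bodyA g)]
  exact (A_loop g).2.2

-- ---------- disjoint-set find ----------

theorem dsuFindGo_succ (p : List Nat) (fuel x : Nat) :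
    dsuFindGo p (fuel+1) x = if p.getD x x = x then x else dsuFindGo p fuel (p.getD x x) := rfl

theorem dsuFindGo_stable (p : List Nat) (hb : ∀ i, p.getD i i ≤ i) :
    ∀ x f₁ f₂, x < f₁ → x < f₂ → dsuFindGo p f₁ x = dsuFindGo p f₂ x := by
  intro x
  induction x using Nat.strong_induction_on with
  | _ x ih =>
      intro f₁ f₂ h1 h2
      obtain ⟨f₁', rfl⟩ : ∃ k, f₁ = k + 1 := ⟨f₁ - 1, by omega⟩
      obtain ⟨f₂', rfl⟩ : ∃ k, f₂ = k + 1 := ⟨f₂ - 1, by omega⟩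
      rw [dsuFindGo_succ, dsuFindGo_succ]
      by_cases hx : p.getD x x = x
      · rw [if_pos hx, if_pos hx]
      · rw [if_neg hx, if_neg hx]
        have hlt : p.getD x x < x := lt_of_le_of_ne (hb x) hx
        exact ih _ hlt _ _ (by omega) (by omega)

theorem dsuFind_unfold (p : List Nat) (hb : ∀ i, p.getD i i ≤ i) (x : Nat) :
    dsuFind p x = if p.getD x x = x then x else dsuFind p (p.getD x x) := by
  unfold dsuFind
  rw [dsuFindGo_succ]
  by_cases hx : p.getD x x = x
  · rw [if_pos hx, if_pos hx]
  · rw [if_neg hx, if_neg hx]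
    have hlt : p.getD x x < x := lt_of_le_of_ne (hb x) hx
    exact dsuFindGo_stable p hb _ _ _ (by omega) (by omega)

theorem dsuFind_of_root (p : List Nat) (hb : ∀ i, p.getD i i ≤ i) {x : Nat}
    (h : p.getD x x = x) : dsuFind p x = x := by
  rw [dsuFind_unfold p hb, if_pos h]

theorem dsuFind_le (p : List Nat) (hb : ∀ i, p.getD i i ≤ i) : ∀ x, dsuFind p x ≤ x := by
  intro x
  induction x using Nat.strong_induction_on with
  | _ x ih =>
      rw [dsuFind_unfold p hb]
      by_cases hx : p.getD x x = x
      · rw [if_pos hx]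
      · rw [if_neg hx]
        have hlt : p.getD x x < x := lt_of_le_of_ne (hb x) hx
        have := ih _ hlt
        omega

theorem dsuFind_isRoot (p : List Nat) (hb : ∀ i, p.getD i i ≤ i) :
    ∀ x, p.getD (dsuFind p x) (dsuFind p x) = dsuFind p x := by
  intro x
  induction x using Nat.strong_induction_on with
  | _ x ih =>
      rw [dsuFind_unfold p hb]
      by_cases hx : p.getD x x = x
      · rw [if_pos hx]; exact hx
      · rw [if_neg hx]
        exact ih _ (lt_of_le_of_ne (hb x) hx)

theorem set_hb {p : List Nat} (hb : ∀ i, p.getD i i ≤ i) {mx mn : Nat} (hlt : mn < mx) :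
    ∀ i, (p.set mx mn).getD i i ≤ i := by
  intro i
  by_cases h : mx = i
  · subst h
    by_cases h2 : mx < p.length
    · rw [getD_set_self h2]; omega
    · rw [List.set_eq_of_length_le (by omega)]; exact hb mx
  · rw [getD_set_ne h]; exact hb i

theorem dsuFind_set (p : List Nat) (hb : ∀ i, p.getD i i ≤ i) {mx mn : Nat}
    (hmx : p.getD mx mx = mx) (hmxlen : mx < p.length) (hmn : p.getD mn mn = mn)
    (hlt : mn < mx) :
    ∀ x, dsuFind (p.set mx mn) x = if dsuFind p x = mx then mn else dsuFind p x := by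
  have hb' := set_hb hb hlt
  intro x
  induction x using Nat.strong_induction_on with
  | _ x ih =>
      by_cases hxm : x = mx
      · subst hxm
        have h1 : (p.set x mn).getD x x = mn := getD_set_self hmxlen
        rw [dsuFind_unfold _ hb', h1, if_neg (by omega)]
        have h2 : dsuFind (p.set x mn) mn = mn := by
          have h3 : (p.set x mn).getD mn mn = mn := by
            rw [getD_set_ne (by omega)]; exact hmn
          exact dsuFind_of_root _ hb' h3
        rw [h2, if_pos (dsuFind_of_root p hb hmx)]
      · have h1 : (p.set mx mn).getD x x = p.getD x x := getD_set_ne (fun h => hxm h.symm)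
        rw [dsuFind_unfold _ hb', h1]
        by_cases hroot : p.getD x x = x
        · rw [if_pos hroot, if_neg (by rw [dsuFind_of_root p hb hroot]; exact hxm)]
          exact (dsuFind_of_root p hb hroot).symm
        · rw [if_neg hroot]
          have hlt2 : p.getD x x < x := lt_of_le_of_ne (hb x) hroot
          rw [ih _ hlt2, dsuFind_unfold p hb x, if_neg hroot]

-- ---------- disjoint-set invariant ----------

def DsuInv (g : List (List Int)) (R : Nat → Nat → Prop) (p : List Nat) : Prop :=
  p.length = gN g ∧ (∀ i, p.getD i i ≤ i) ∧
  (∀ x, SameRel R x (dsuFind p x)) ∧ (∀ x y, SameRel R x y → dsuFind p x ≤ y)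

theorem sameRoot_of_same {g : List (List Int)} {R : Nat → Nat → Prop} {p : List Nat}
    (hInv : DsuInv g R p) {x y : Nat} (h : SameRel R x y) : dsuFind p x = dsuFind p y := by
  have h1 : SameRel R y (dsuFind p x) :=
    Relation.ReflTransGen.trans (sameRel_symm h) (hInv.2.2.1 x)
  have h2 : SameRel R x (dsuFind p y) :=
    Relation.ReflTransGen.trans h (hInv.2.2.1 y)
  have h3 := hInv.2.2.2 y _ h1
  have h4 := hInv.2.2.2 x _ h2
  omega

theorem same_of_sameRoot {g : List (List Int)} {R : Nat → Nat → Prop} {p : List Nat}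
    (hInv : DsuInv g R p) {x y : Nat} (h : dsuFind p x = dsuFind p y) : SameRel R x y := by
  have h1 := hInv.2.2.1 x
  have h2 := hInv.2.2.1 y
  rw [h] at h1
  exact Relation.ReflTransGen.trans h1 (sameRel_symm h2)

theorem DsuInv_congr {g : List (List Int)} {R R' : Nat → Nat → Prop} {p : List Nat}
    (h : ∀ u v, R u v ↔ R' u v) (hInv : DsuInv g R p) : DsuInv g R' p := by
  refine ⟨hInv.1, hInv.2.1, ?_, ?_⟩
  · intro x; exact sameRel_congr h (hInv.2.2.1 x)
  · intro x y hxy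
    exact hInv.2.2.2 x y (sameRel_congr (fun u v => (h u v).symm) hxy)

theorem sameRel_mono {R R' : Nat → Nat → Prop} (h : ∀ u v, R u v → R' u v) {x y : Nat}
    (hxy : SameRel R x y) : SameRel R' x y := by
  induction hxy with
  | refl => exact Relation.ReflTransGen.refl
  | tail _ h2 ih =>
      refine Relation.ReflTransGen.tail ih ?_
      rcases h2 with h2 | h2
      · exact Or.inl (h _ _ h2)
      · exact Or.inr (h _ _ h2)

-- closure of a relation extended by one edge (a, b)
theorem sameRel_addPair {R : Nat → Nat → Prop} {a b x y : Nat}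
    (h : SameRel (fun u v => R u v ∨ (u = a ∧ v = b)) x y) :
    SameRel R x y ∨ (SameRel R x a ∧ SameRel R b y) ∨ (SameRel R x b ∧ SameRel R a y) := by
  induction h with
  | refl => exact Or.inl Relation.ReflTransGen.refl
  | tail _ h2 ih =>
      rename_i u z _
      rcases h2 with (h2 | ⟨rfl, rfl⟩) | (h2 | ⟨rfl, rfl⟩)
      · -- forward R edge u → z
        rcases ih with ih | ⟨ih1, ih2⟩ | ⟨ih1, ih2⟩
        · exact Or.inl (Relation.ReflTransGen.tail ih (Or.inl h2))
        · exact Or.inr (Or.inl ⟨ih1, Relation.ReflTransGen.tail ih2 (Or.inl h2)⟩)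
        · exact Or.inr (Or.inr ⟨ih1, Relation.ReflTransGen.tail ih2 (Or.inl h2)⟩)
      · -- the new edge a → b
        rcases ih with ih | ⟨ih1, ih2⟩ | ⟨ih1, ih2⟩
        · exact Or.inr (Or.inl ⟨ih, Relation.ReflTransGen.refl⟩)
        · exact Or.inr (Or.inl ⟨ih1, Relation.ReflTransGen.refl⟩)
        · exact Or.inl ih1
      · -- backward R edge u → z (i.e. R z u)
        rcases ih with ih | ⟨ih1, ih2⟩ | ⟨ih1, ih2⟩
        · exact Or.inl (Relation.ReflTransGen.tail ih (Or.inr h2))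
        · exact Or.inr (Or.inl ⟨ih1, Relation.ReflTransGen.tail ih2 (Or.inr h2)⟩)
        · exact Or.inr (Or.inr ⟨ih1, Relation.ReflTransGen.tail ih2 (Or.inr h2)⟩)
      · -- the new edge backwards: u = b, z = a
        rcases ih with ih | ⟨ih1, ih2⟩ | ⟨ih1, ih2⟩
        · exact Or.inr (Or.inr ⟨ih, Relation.ReflTransGen.refl⟩)
        · exact Or.inl ih1
        · exact Or.inr (Or.inr ⟨ih1, Relation.ReflTransGen.refl⟩)

theorem sameRel_addPair_of_left {R : Nat → Nat → Prop} {a b x y : Nat} (h : SameRel R x y) :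
    SameRel (fun u v => R u v ∨ (u = a ∧ v = b)) x y :=
  sameRel_mono (fun _ _ h2 => Or.inl h2) h

theorem sameRel_addPair_edge {R : Nat → Nat → Prop} {a b : Nat} :
    SameRel (fun u v => R u v ∨ (u = a ∧ v = b)) a b :=
  Relation.ReflTransGen.single (Or.inl (Or.inr ⟨rfl, rfl⟩))

-- the union step of B, semantically
theorem union_spec (g : List (List Int)) (R : Nat → Nat → Prop)
    (hRE : ∀ u v, R u v → Em g u ∧ Em g v) (p : List Nat) (reg : Int) (a b : Nat)
    (hInv : DsuInv g R p)
    (hreg : reg = ((classFilter (fun i => Em g i ∧ dsuFind p i = i) (gN g)).card : Int))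
    (hEma : Em g a) (hEmb : Em g b) :
    DsuInv g (fun u v => R u v ∨ (u = a ∧ v = b)) (dsuUnion (p, reg) a b).1 ∧
    (dsuUnion (p, reg) a b).2 =
      ((classFilter (fun i => Em g i ∧ dsuFind (dsuUnion (p, reg) a b).1 i = i)
        (gN g)).card : Int) := by
  obtain ⟨hlen, hb, hs1, hs2⟩ := hInv
  have hra := dsuFind_isRoot p hb a
  have hrb := dsuFind_isRoot p hb b
  have hral : dsuFind p a < gN g := lt_of_le_of_lt (dsuFind_le p hb a) hEma.1
  have hrbl : dsuFind p b < gN g := lt_of_le_of_lt (dsuFind_le p hb b) hEmb.1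
  have hEmra : Em g (dsuFind p a) := by
    by_cases h : a = dsuFind p a
    · exact h ▸ hEma
    · exact sameRel_em hRE (hs1 a) h
  have hEmrb : Em g (dsuFind p b) := by
    by_cases h : b = dsuFind p b
    · exact h ▸ hEmb
    · exact sameRel_em hRE (hs1 b) h
  by_cases heq : dsuFind p a = dsuFind p b
  · -- already in the same class: nothing changes
    have hU : dsuUnion (p, reg) a b = (p, reg) := by
      unfold dsuUnion
      rw [if_pos heq]
    rw [hU]
    have hab : SameRel R a b := same_of_sameRoot ⟨hlen, hb, hs1, hs2⟩ heq
    have habsorb : ∀ x y, SameRel (fun u v => R u v ∨ (u = a ∧ v = b)) x y ↔ SameRel R x y := by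
      intro x y
      constructor
      · intro h
        rcases sameRel_addPair h with h | ⟨h1, h2⟩ | ⟨h1, h2⟩
        · exact h
        · exact Relation.ReflTransGen.trans h1
            (Relation.ReflTransGen.trans hab h2)
        · exact Relation.ReflTransGen.trans h1
            (Relation.ReflTransGen.trans (sameRel_symm hab) h2)
      · exact sameRel_addPair_of_left
    refine ⟨⟨hlen, hb, ?_, ?_⟩, hreg⟩
    · intro x; exact sameRel_addPair_of_left (hs1 x)
    · intro x y hxy; exact hs2 x y ((habsorb x y).mp hxy)
  · -- merge the two classes
    set ra := dsuFind p a with hradef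
    set rb := dsuFind p b with hrbdef
    set mx := max ra rb with hmxdef
    set mn := min ra rb with hmndef
    have hmxr : p.getD mx mx = mx := by
      rcases max_choice ra rb with h | h <;> rw [hmxdef, h]
      · exact hra
      · exact hrb
    have hmnr : p.getD mn mn = mn := by
      rcases min_choice ra rb with h | h <;> rw [hmndef, h]
      · exact hra
      · exact hrb
    have hmnlt : mn < mx := by
      rw [hmxdef, hmndef]
      rcases Nat.lt_or_ge ra rb with h | h
      · rw [max_eq_right (by omega), min_eq_left (by omega)]; omega
      · have h2 : rb < ra := by omega
        rw [max_eq_left (by omega), min_eq_right (by omega)]; omega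
    have hmxlen : mx < p.length := by
      rw [hlen, hmxdef]
      rcases max_choice ra rb with h | h <;> rw [h]
      · exact hral
      · exact hrbl
    have hEmmx : Em g mx := by
      rcases max_choice ra rb with h | h <;> rw [hmxdef, h]
      · exact hEmra
      · exact hEmrb
    have hU : dsuUnion (p, reg) a b = (p.set mx mn, reg - 1) := by
      unfold dsuUnion
      rw [if_neg heq]
    rw [hU]
    have hb' := set_hb hb hmnlt
    have hfind := dsuFind_set p hb hmxr hmxlen hmnr hmnlt
    have hramx : ∀ x, SameRel R x a → dsuFind p x = ra := by
      intro x hx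
      rw [hradef]
      exact sameRoot_of_same ⟨hlen, hb, hs1, hs2⟩ hx
    have hrbmx : ∀ x, SameRel R x b → dsuFind p x = rb := by
      intro x hx
      rw [hrbdef]
      exact sameRoot_of_same ⟨hlen, hb, hs1, hs2⟩ hx
    have hrarb : SameRel (fun u v => R u v ∨ (u = a ∧ v = b)) ra rb := by
      have h1 : SameRel R a ra := hs1 a
      have h2 : SameRel R b rb := hs1 b
      exact Relation.ReflTransGen.trans
        (sameRel_addPair_of_left (sameRel_symm h1))
        (Relation.ReflTransGen.trans sameRel_addPair_edge (sameRel_addPair_of_left h2))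
    have hmxmn : SameRel (fun u v => R u v ∨ (u = a ∧ v = b)) mx mn := by
      rcases Nat.le_total ra rb with h | h
      · rw [hmxdef, hmndef, max_eq_right h, min_eq_left h]
        exact sameRel_symm hrarb
      · rw [hmxdef, hmndef, max_eq_left h, min_eq_right h]
        exact hrarb
    constructor
    · refine ⟨by rw [List.length_set]; exact hlen, hb', ?_, ?_⟩
      · intro x
        have h1 : SameRel (fun u v => R u v ∨ (u = a ∧ v = b)) x (dsuFind p x) :=
          sameRel_addPair_of_left (hs1 x)
        rw [hfind x]
        by_cases h2 : dsuFind p x = mx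
        · rw [if_pos h2]
          rw [h2] at h1
          exact Relation.ReflTransGen.trans h1 hmxmn
        · rw [if_neg h2]
          exact h1
      · intro x y hxy
        rw [hfind x]
        rcases sameRel_addPair hxy with h | ⟨h1, h2⟩ | ⟨h1, h2⟩
        · have h3 := hs2 x y h
          by_cases h2 : dsuFind p x = mx
          · rw [if_pos h2]; omega
          · rw [if_neg h2]; exact h3
        · -- x ~ a, b ~ y
          have h3 : dsuFind p x = ra := hramx x h1
          have h4 : dsuFind p b ≤ y := hs2 b y h2
          rcases Nat.le_total ra rb with h5 | h5
          · have : mx = rb := by rw [hmxdef, max_eq_right h5]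
            have : mn = ra := by rw [hmndef, min_eq_left h5]
            by_cases h6 : dsuFind p x = mx
            · rw [if_pos h6]; omega
            · rw [if_neg h6]; omega
          · have : mx = ra := by rw [hmxdef, max_eq_left h5]
            have : mn = rb := by rw [hmndef, min_eq_right h5]
            by_cases h6 : dsuFind p x = mx
            · rw [if_pos h6]; omega
            · rw [if_neg h6]; omega
        · -- x ~ b, a ~ y
          have h3 : dsuFind p x = rb := hrbmx x h1
          have h4 : dsuFind p a ≤ y := hs2 a y h2
          rcases Nat.le_total ra rb with h5 | h5
          · have : mx = rb := by rw [hmxdef, max_eq_right h5]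
            have : mn = ra := by rw [hmndef, min_eq_left h5]
            by_cases h6 : dsuFind p x = mx
            · rw [if_pos h6]; omega
            · rw [if_neg h6]; omega
          · have : mx = ra := by rw [hmxdef, max_eq_left h5]
            have : mn = rb := by rw [hmndef, min_eq_right h5]
            by_cases h6 : dsuFind p x = mx
            · rw [if_pos h6]; omega
            · rw [if_neg h6]; omega
    · -- the counter drops by exactly one (the old root mx stops being a root)
      simp only []
      have hiff : ∀ i, i < gN g →
          ((Em g i ∧ dsuFind (p.set mx mn) i = i) ↔ ((Em g i ∧ dsuFind p i = i) ∧ i ≠ mx)) := by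
        intro i _
        rw [hfind i]
        by_cases h2 : dsuFind p i = mx
        · rw [if_pos h2]
          constructor
          · rintro ⟨hEmi, h3⟩
            exfalso
            have h4 := dsuFind_le p hb i
            omega
          · rintro ⟨⟨hEmi, h3⟩, h4⟩
            exact absurd (h3 ▸ h2) h4
        · rw [if_neg h2]
          constructor
          · rintro ⟨hEmi, h3⟩
            exact ⟨⟨hEmi, h3⟩, by omega⟩
          · rintro ⟨⟨hEmi, h3⟩, _⟩
            exact ⟨hEmi, h3⟩
      have hmem : Em g mx ∧ dsuFind p mx = mx := ⟨hEmmx, dsuFind_of_root p hb hmxr⟩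
      have hcard := card_classFilter_erase (n := gN g) (a := mx) hEmmx.1 hmem hiff
      rw [hreg]
      push_cast [← hcard]
      ring

-- ---------- B-side loop ----------

theorem relK_em {g : List (List Int)} {k u v : Nat} (h : RelK g k u v) : Em g u ∧ Em g v :=
  ⟨h.1.1, h.1.2.1⟩

theorem getD_range_self (n i : Nat) : (List.range n).getD i i = i := by
  by_cases h : i < n
  · rw [List.getD_eq_getElem _ _ (by simpa using h)]
    simp
  · exact getD_of_length_le (by simpa using h)

def bodyB (g : List (List Int)) (st : List Nat × Int) (r c : Nat) : List Nat × Int :=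
  if altGet g r c > 0 then st
  else
    let i := r * ffCols g + c
    let st1 := if c + 1 < ffCols g ∧ altGet g r (c+1) ≤ 0 then dsuUnion st i (i+1) else st
    if r + 1 < g.length ∧ altGet g (r+1) c ≤ 0 then dsuUnion st1 i (i + ffCols g) else st1

def invB (g : List (List Int)) (k : Nat) (st : List Nat × Int) : Prop :=
  DsuInv g (RelK g k) st.1 ∧
  st.2 = ((classFilter (fun i => Em g i ∧ dsuFind st.1 i = i) (gN g)).card : Int)

-- counting the empty cells
theorem B_empties (g : List (List Int)) :
    ((List.range g.length).foldl (fun acc r => (List.range (ffCols g)).foldl (fun acc c =>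
      if altGet g r c ≤ 0 then acc + 1 else acc) acc) (0 : Int))
    = ((classFilter (Em g) (gN g)).card : Int) := by
  rw [nested_foldl (fun acc r c => if altGet g r c ≤ 0 then acc + 1 else acc)]
  have h := foldl_range_invariant
    (fun k acc => acc = ((classFilter (Em g) k).card : Int))
    (fun acc i => if altGet g (i / ffCols g) (i % ffCols g) ≤ 0 then acc + 1 else acc)
    (g.length * ffCols g) 0 (by simp [classFilter]) ?_
  · exact h
  · intro k acc hk hP
    obtain ⟨hrlt, hclt, hrc⟩ := i_decomp (show k < g.length * ffCols g from hk)
    have hcell : altGet g (k / ffCols g) (k % ffCols g) = gcell g k := by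
      rw [altGet_eq, ← gcell_rc hclt, hrc]
    show (if altGet g (k / ffCols g) (k % ffCols g) ≤ 0 then acc + 1 else acc)
      = ((classFilter (Em g) (k+1)).card : Int)
    rw [hcell]
    by_cases hle : gcell g k ≤ 0
    · rw [if_pos hle]
      have hEm : Em g k := ⟨hk, hle⟩
      rw [hP]
      unfold gN at *
      rw [card_classFilter_succ_pos hEm]
      push_cast
      ring
    · rw [if_neg hle]
      have hnEm : ¬ Em g k := fun h => hle h.2
      rw [hP]
      rw [card_classFilter_succ_neg hnEm]

theorem B_loop (g : List (List Int)) (st0 : List Nat × Int)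
    (h0 : invB g 0 st0) :
    invB g (gN g) ((List.range (gN g)).foldl
      (fun st i => bodyB g st (i / ffCols g) (i % ffCols g)) st0) := by
  apply foldl_range_invariant (invB g) _ (gN g) st0 h0
  intro k st hk hP
  obtain ⟨hInv, hreg⟩ := hP
  obtain ⟨hrlt, hclt, hrc⟩ := i_decomp (show k < g.length * ffCols g from hk)
  set r := k / ffCols g with hrdef
  set c := k % ffCols g with hcdef
  have hcell : altGet g r c = gcell g k := by
    rw [altGet_eq, ← gcell_rc hclt, hrc]
  unfold bodyB
  rw [hcell]
  by_cases hwall : gcell g k > 0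
  · rw [if_pos hwall]
    have hcongr : ∀ u v, RelK g k u v ↔ RelK g (k+1) u v := by
      intro u v
      constructor
      · rintro ⟨h1, h2⟩; exact ⟨h1, by omega⟩
      · rintro ⟨h1, h2⟩
        refine ⟨h1, ?_⟩
        rcases Nat.lt_succ_iff_lt_or_eq.mp h2 with h | h
        · exact h
        · subst h
          exfalso
          have := h1.1.2
          omega
    exact ⟨DsuInv_congr hcongr hInv, hreg⟩
  · rw [if_neg hwall]
    have hEmk : Em g k := ⟨hk, by omega⟩
    have hCpos : 0 < ffCols g := by omega
    set rightC : Prop := (c + 1 < ffCols g ∧ Em g (k+1)) with hrCdef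
    set downC : Prop := Em g (k + ffCols g) with hdCdef
    have hcond1 : (c + 1 < ffCols g ∧ altGet g r (c+1) ≤ 0) ↔ rightC := by
      rw [hrCdef]
      constructor
      · rintro ⟨h1, h2⟩
        refine ⟨h1, ?_, ?_⟩
        · have := idx_lt hrlt h1
          unfold gN
          omega
        · rw [altGet_eq, ← gcell_rc h1] at h2
          have he : r * ffCols g + (c + 1) = k + 1 := by omega
          rwa [he] at h2
      · rintro ⟨h1, h2, h3⟩
        refine ⟨h1, ?_⟩
        rw [altGet_eq, ← gcell_rc h1]
        have he : r * ffCols g + (c + 1) = k + 1 := by omega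
        rwa [he]
    have hmul : (r + 1) * ffCols g = r * ffCols g + ffCols g := by ring
    have hcond2 : (r + 1 < g.length ∧ altGet g (r+1) c ≤ 0) ↔ downC := by
      rw [hdCdef]
      constructor
      · rintro ⟨h1, h2⟩
        refine ⟨?_, ?_⟩
        · have := idx_lt h1 hclt
          unfold gN
          omega
        · rw [altGet_eq, ← gcell_rc hclt] at h2
          have he : (r + 1) * ffCols g + c = k + ffCols g := by omega
          rwa [he] at h2
      · rintro ⟨h1, h2⟩
        have hr1 : r + 1 < g.length := by
          by_contra hcon
          have h3 : g.length * ffCols g ≤ (r + 1) * ffCols g :=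
            Nat.mul_le_mul_right _ (by omega)
          unfold gN at h1
          omega
        refine ⟨hr1, ?_⟩
        rw [altGet_eq, ← gcell_rc hclt]
        have he : (r + 1) * ffCols g + c = k + ffCols g := by omega
        rwa [he]
    -- the horizontal union
    have hmid : DsuInv g (fun u v => RelK g k u v ∨ (u = k ∧ v = k + 1 ∧ rightC))
          ((if c + 1 < ffCols g ∧ altGet g r (c+1) ≤ 0 then
            dsuUnion st (r * ffCols g + c) (r * ffCols g + c + 1) else st)).1 ∧
        ((if c + 1 < ffCols g ∧ altGet g r (c+1) ≤ 0 then
            dsuUnion st (r * ffCols g + c) (r * ffCols g + c + 1) else st)).2 =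
          ((classFilter (fun i => Em g i ∧
            dsuFind ((if c + 1 < ffCols g ∧ altGet g r (c+1) ≤ 0 then
              dsuUnion st (r * ffCols g + c) (r * ffCols g + c + 1) else st)).1 i = i)
            (gN g)).card : Int) := by
      by_cases hc1 : c + 1 < ffCols g ∧ altGet g r (c+1) ≤ 0
      · rw [if_pos hc1]
        have hrC : rightC := hcond1.mp hc1
        have hu := union_spec g (RelK g k) (fun u v h => relK_em h) st.1 st.2 k (k+1)
          hInv hreg hEmk hrC.2
        have hst : (st.1, st.2) = st := rfl
        rw [hst] at hu
        have he : r * ffCols g + c = k := hrc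
        rw [he]
        refine ⟨DsuInv_congr ?_ hu.1, hu.2⟩
        intro u v
        constructor
        · rintro (h | ⟨h1, h2⟩)
          · exact Or.inl h
          · exact Or.inr ⟨h1, h2, hrC⟩
        · rintro (h | ⟨h1, h2, _⟩)
          · exact Or.inl h
          · exact Or.inr ⟨h1, h2⟩
      · rw [if_neg hc1]
        have hnC : ¬ rightC := fun h => hc1 (hcond1.mpr h)
        refine ⟨DsuInv_congr ?_ hInv, hreg⟩
        intro u v
        constructor
        · intro h; exact Or.inl h
        · rintro (h | ⟨_, _, h3⟩)
          · exact h
          · exact absurd h3 hnC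
    set st1 := (if c + 1 < ffCols g ∧ altGet g r (c+1) ≤ 0 then
      dsuUnion st (r * ffCols g + c) (r * ffCols g + c + 1) else st) with hst1def
    -- the vertical union
    have hmid2 : DsuInv g (fun u v => (RelK g k u v ∨ (u = k ∧ v = k + 1 ∧ rightC)) ∨
          (u = k ∧ v = k + ffCols g ∧ downC))
          ((if r + 1 < g.length ∧ altGet g (r+1) c ≤ 0 then
            dsuUnion st1 (r * ffCols g + c) (r * ffCols g + c + ffCols g) else st1)).1 ∧
        ((if r + 1 < g.length ∧ altGet g (r+1) c ≤ 0 then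
            dsuUnion st1 (r * ffCols g + c) (r * ffCols g + c + ffCols g) else st1)).2 =
          ((classFilter (fun i => Em g i ∧
            dsuFind ((if r + 1 < g.length ∧ altGet g (r+1) c ≤ 0 then
              dsuUnion st1 (r * ffCols g + c) (r * ffCols g + c + ffCols g) else st1)).1 i = i)
            (gN g)).card : Int) := by
      have hREmid : ∀ u v, (RelK g k u v ∨ (u = k ∧ v = k + 1 ∧ rightC)) → Em g u ∧ Em g v := by
        rintro u v (h | ⟨rfl, rfl, h⟩)
        · exact relK_em h
        · exact ⟨hEmk, h.2⟩
      by_cases hc2 : r + 1 < g.length ∧ altGet g (r+1) c ≤ 0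
      · rw [if_pos hc2]
        have hdC : downC := hcond2.mp hc2
        have hu := union_spec g _ hREmid st1.1 st1.2 k (k + ffCols g)
          hmid.1 hmid.2 hEmk hdC
        have hst : (st1.1, st1.2) = st1 := rfl
        rw [hst] at hu
        have he : r * ffCols g + c = k := hrc
        rw [he]
        refine ⟨DsuInv_congr ?_ hu.1, hu.2⟩
        intro u v
        constructor
        · rintro (h | ⟨h1, h2⟩)
          · exact Or.inl h
          · exact Or.inr ⟨h1, h2, hdC⟩
        · rintro (h | ⟨h1, h2, _⟩)
          · exact Or.inl h
          · exact Or.inr ⟨h1, h2⟩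
      · rw [if_neg hc2]
        have hnC : ¬ downC := fun h => hc2 (hcond2.mpr h)
        refine ⟨DsuInv_congr ?_ hmid.1, hmid.2⟩
        intro u v
        constructor
        · intro h; exact Or.inl h
        · rintro (h | ⟨_, _, h3⟩)
          · exact h
          · exact absurd h3 hnC
    refine ⟨DsuInv_congr ?_ hmid2.1, hmid2.2⟩
    intro u v
    constructor
    · rintro ((h | ⟨rfl, rfl, hrC⟩) | ⟨rfl, rfl, hdC⟩)
      · exact ⟨h.1, by have := h.2; omega⟩
      · obtain ⟨h1, h2⟩ := hrC
        refine ⟨⟨hEmk, h2, Or.inl ⟨rfl, ?_⟩⟩, by omega⟩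
        rw [← hcdef]
        exact h1
      · exact ⟨⟨hEmk, hdC, Or.inr rfl⟩, by omega⟩
    · rintro ⟨⟨hEmu, hEmv, hgeo⟩, hu⟩
      rcases Nat.lt_succ_iff_lt_or_eq.mp hu with h | h
      · exact Or.inl (Or.inl ⟨⟨hEmu, hEmv, hgeo⟩, h⟩)
      · rcases hgeo with ⟨hv, hmod⟩ | hv
        · refine Or.inl (Or.inr ⟨h, by omega, ?_, ?_⟩)
          · rw [hcdef, ← h]
            exact hmod
          · have hveq : v = k + 1 := by omega
            rw [← hveq]
            exact hEmv
        · refine Or.inr ⟨h, by omega, ?_⟩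
          rw [hdCdef]
          have hveq : v = k + ffCols g := by omega
          rw [← hveq]
          exact hEmv

-- the B port computes the number of component representatives too
theorem B_char (g : List (List Int)) :
    find_fragmentation_alt g = (repCount g (gN g) : Int) := by
  have h1 : find_fragmentation_alt g = ((List.range g.length).foldl (fun st r =>
      (List.range (ffCols g)).foldl (fun st c => bodyB g st r c) st)
      (List.range (g.length * ffCols g),
        (List.range g.length).foldl (fun acc r => (List.range (ffCols g)).foldl (fun acc c =>
          if altGet g r c ≤ 0 then acc + 1 else acc) acc) (0 : Int))).2 := by
    unfold find_fragmentation_alt bodyB ffCols altGet dsuUnion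
    rfl
  rw [h1, nested_foldl (bodyB g)]
  have hgn : g.length * ffCols g = gN g := rfl
  rw [hgn]
  have hb0 : ∀ i, (List.range (gN g)).getD i i ≤ i := by
    intro i; rw [getD_range_self]
  have hfind0 : ∀ x, dsuFind (List.range (gN g)) x = x := by
    intro x
    exact dsuFind_of_root _ hb0 (getD_range_self _ x)
  have h0 : invB g 0 (List.range (gN g),
      (List.range g.length).foldl (fun acc r => (List.range (ffCols g)).foldl (fun acc c =>
        if altGet g r c ≤ 0 then acc + 1 else acc) acc) (0 : Int)) := by
    constructor
    · refine ⟨List.length_range, hb0, ?_, ?_⟩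
      · intro x
        rw [hfind0 x]
        exact Relation.ReflTransGen.refl
      · intro x y hxy
        rw [hfind0 x]
        rw [sameRel_zero hxy]
    · show (List.range g.length).foldl (fun acc r => (List.range (ffCols g)).foldl (fun acc c =>
        if altGet g r c ≤ 0 then acc + 1 else acc) acc) (0 : Int) = _
      rw [B_empties g]
      have hcc : classFilter (Em g) (gN g) = classFilter
          (fun i => Em g i ∧ dsuFind (List.range (gN g)) i = i) (gN g) := by
        apply classFilter_congr
        intro i _
        rw [hfind0 i]
        simp
      rw [hcc]
  obtain ⟨hInv, hreg⟩ := B_loop g _ h0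
  rw [hreg]
  unfold repCount
  obtain ⟨hlen, hb, hs1, hs2⟩ := hInv
  have hcc : classFilter (fun i => Em g i ∧ dsuFind ((List.range (gN g)).foldl
        (fun st i => bodyB g st (i / ffCols g) (i % ffCols g))
        (List.range (gN g),
          (List.range g.length).foldl (fun acc r => (List.range (ffCols g)).foldl (fun acc c =>
            if altGet g r c ≤ 0 then acc + 1 else acc) acc) (0 : Int))).1 i = i) (gN g)
      = classFilter (RepCond g) (gN g) := by
    apply classFilter_congr
    intro i hi
    constructor
    · rintro ⟨hEm, hroot⟩
      refine ⟨hEm, ?_⟩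
      intro j hj
      have h2 : SameRel (RelK g (gN g)) i j := sameRel_final.mpr (reach_symm hj)
      have h3 := hs2 i j h2
      omega
    · rintro ⟨hEm, hmin⟩
      refine ⟨hEm, ?_⟩
      have h2 : Reach g (dsuFind _ i) i :=
        reach_symm (sameRel_final.mp (hs1 i))
      have h3 := hmin _ h2
      have h4 := dsuFind_le _ hb i
      omega
  rw [hcc]
-- ===== VERDICT (by name: the statement is the Claim_ definition above) =====
theorem find_fragmentation_spec : Claim_equal_find_fragmentation := by
  intro grid _ _
  unfold Spec_find_fragmentation
  rw [A_char, B_char]
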